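-- pv_equiv track=rewrite | github.com/mayank905/Geek4geek | Maximize array greatness.py | maximizeGreatness
-- ===== SOURCE A (Python) =====
-- from collections import defaultdict
-- from typing import List
--
-- def maximizeGreatness(nums: List[int]) -> int:
--     nums.sort()
--     count=0
--     small=0
--     d=defaultdict(int)
--     d[nums[0]]=1
--     for i in range(1,len(nums)):
--         if nums[i]>nums[i-1]:
--             small+=d[nums[i-1]]
--         d[nums[i]]+=1
--         if small>0:
--             count+=1
--             small-=1
--     return count
-- ===== SOURCE B (Python) =====
-- from collections import Counter
-- from typing import List
--
-- def maximizeGreatness(nums: List[int]) -> int: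
--     # greatness = n - (largest multiplicity): every element except one copy of
--     # the most frequent value can be placed above a strictly smaller element.
--     freq = Counter(nums)
--     return len(nums) - max(freq.values(), default=0)
-- ===== Notes on version B (the rewrite author's own statement) =====
-- stated objective: faster
-- what changed: Replaces sort + sweep with a queue-like counter by a single frequency count: answer = len(nums) - max frequency, no sort.
import Mathlib
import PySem

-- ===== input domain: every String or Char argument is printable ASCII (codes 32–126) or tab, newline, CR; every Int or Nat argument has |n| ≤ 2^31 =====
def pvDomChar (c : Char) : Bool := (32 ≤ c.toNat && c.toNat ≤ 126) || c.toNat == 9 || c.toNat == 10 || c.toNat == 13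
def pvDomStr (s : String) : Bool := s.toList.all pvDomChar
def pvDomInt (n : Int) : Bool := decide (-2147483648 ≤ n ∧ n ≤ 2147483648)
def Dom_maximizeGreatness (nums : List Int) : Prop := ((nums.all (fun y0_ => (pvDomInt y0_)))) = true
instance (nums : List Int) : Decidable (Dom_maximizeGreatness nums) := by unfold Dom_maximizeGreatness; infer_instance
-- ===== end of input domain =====

-- B replaces A's sort + sweep by a single frequency count (answer = n - max frequency);
-- A sorts its argument in place (Python-side side effect), the equivalence proved here is about the return value only.

-- ===== PORT A =====
-- body of A's for-loop; state = (count, small, d); indices i of the loop are always in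
-- range on Pre_ (nums ≠ []), so pyGetD _ _ 0 is exact there
def aStep (s : List Int) (st : Int × Int × PySem.Dict Int Int) (i : Int) :
    Int × Int × PySem.Dict Int Int :=
  let small := if PySem.List.pyGetD s i 0 > PySem.List.pyGetD s (i - 1) 0
               then st.2.1 + (st.2.2).getD (PySem.List.pyGetD s (i - 1) 0) 0 else st.2.1
  let d := (st.2.2).modify (PySem.List.pyGetD s i 0) 0 (· + 1)
  if small > 0 then (st.1 + 1, small - 1, d) else (st.1, small, d)

def maximizeGreatness (nums : List Int) : Int :=
  let s := PySem.List.sorted nums (fun x => x) false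
  let d := (PySem.Dict.empty : PySem.Dict Int Int).insert (PySem.List.pyGetD s 0 0) 1
  let r := (PySem.List.pyRange 1 (PySem.List.len s) 1).foldl (aStep s) (0, 0, d)
  r.1

-- ===== PORT B =====
def maximizeGreatness_alt (nums : List Int) : Int :=
  let freq := PySem.Dict.counter nums
  PySem.List.len nums - PySem.List.maxD freq.values (fun v => v) 0

-- ===== PRECONDITION & SPEC =====
-- A reads the first element before the loop: it raises IndexError exactly on the empty list
def Pre_maximizeGreatness (nums : List Int) : Prop := nums ≠ []
instance (nums : List Int) : Decidable (Pre_maximizeGreatness nums) := by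
  unfold Pre_maximizeGreatness; infer_instance
def pvWitness_maximizeGreatness : List Int := [1, 2, 2]

def Spec_maximizeGreatness (nums : List Int) (out : Int) : Prop := out = maximizeGreatness_alt nums
instance (nums : List Int) (out : Int) : Decidable (Spec_maximizeGreatness nums out) := by
  unfold Spec_maximizeGreatness; infer_instance

-- ===== CLAIM (what is proved, stated in full; the proofs are below) =====
def Claim_equal_maximizeGreatness : Prop := ∀ (nums : List Int), Dom_maximizeGreatness nums → Pre_maximizeGreatness nums → Spec_maximizeGreatness nums (maximizeGreatness nums)

-- ===== LEMMAS AND PROOFS =====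

-- the largest multiplicity occurring in xs (0 for [])
def pvMC (xs : List Int) : Int := (xs.map (fun v => (xs.count v : Int))).foldl max 0

lemma pvMC_nonneg (xs : List Int) : 0 ≤ pvMC xs := by
  have h := (PySem.List.le_foldl_max_int xs (fun v => (xs.count v : Int)) 0).1
  simpa [pvMC, List.foldl_map] using h

lemma pvMC_ub (xs : List Int) (v : Int) : (xs.count v : Int) ≤ pvMC xs := by
  by_cases hv : v ∈ xs
  · have h := (PySem.List.le_foldl_max_int xs (fun v => (xs.count v : Int)) 0).2 v hv
    simpa [pvMC, List.foldl_map] using h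
  · simp [List.count_eq_zero_of_not_mem hv, pvMC_nonneg]

lemma pvMC_mem (xs : List Int) (h : xs ≠ []) : ∃ v ∈ xs, pvMC xs = (xs.count v : Int) := by
  rcases PySem.List.foldl_max_mem (xs.map (fun v => (xs.count v : Int))) 0 with h0 | hm
  · exfalso
    obtain ⟨a, t, rfl⟩ := List.exists_cons_of_ne_nil h
    have h1 : ((a :: t).count a : Int) ≤ pvMC (a :: t) := pvMC_ub _ a
    have : pvMC (a :: t) = 0 := h0
    have hc : 1 ≤ (a :: t).count a := List.one_le_count_iff.mpr (List.mem_cons_self)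
    omega
  · rcases List.mem_map.mp hm with ⟨v, hv, heq⟩
    exact ⟨v, hv, heq.symm⟩

lemma pvMC_pos (xs : List Int) (h : xs ≠ []) : 1 ≤ pvMC xs := by
  obtain ⟨v, hv, he⟩ := pvMC_mem xs h
  have := List.one_le_count_iff.mpr hv
  omega

lemma pvMC_perm {xs ys : List Int} (h : xs.Perm ys) : pvMC xs = pvMC ys := by
  rcases eq_or_ne xs [] with rfl | hne
  · simp [List.Perm.nil_eq h |>.symm]
  · have hyne : ys ≠ [] := by
      intro h0; subst h0; exact hne (List.Perm.eq_nil h)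
    apply le_antisymm
    · obtain ⟨v, hv, he⟩ := pvMC_mem xs hne
      rw [he, h.count_eq]; exact pvMC_ub ys v
    · obtain ⟨v, hv, he⟩ := pvMC_mem ys hyne
      rw [he, ← h.count_eq]; exact pvMC_ub xs v

lemma pvMC_append_le (P : List Int) (x : Int) (hP : P ≠ [])
    (h : ((P ++ [x]).count x : Int) ≤ pvMC P) : pvMC (P ++ [x]) = pvMC P := by
  apply le_antisymm
  · obtain ⟨v, hv, he⟩ := pvMC_mem (P ++ [x]) (by simp)
    rw [he]
    rcases eq_or_ne v x with rfl | hvx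
    · exact h
    · have : (P ++ [x]).count v = P.count v := by
        simp [List.count_append, List.count_singleton, Ne.symm hvx]
      rw [this]; exact pvMC_ub P v
  · obtain ⟨v, hv, he⟩ := pvMC_mem P hP
    rw [he]
    have : P.count v ≤ (P ++ [x]).count v := by simp [List.count_append]
    calc (P.count v : Int) ≤ ((P ++ [x]).count v : Int) := by exact_mod_cast this
      _ ≤ pvMC (P ++ [x]) := pvMC_ub _ v

lemma pvMC_append_succ (P : List Int) (x : Int)
    (h : ((P ++ [x]).count x : Int) = pvMC P + 1) : pvMC (P ++ [x]) = pvMC P + 1 := by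
  apply le_antisymm
  · obtain ⟨v, hv, he⟩ := pvMC_mem (P ++ [x]) (by simp)
    rw [he]
    rcases eq_or_ne v x with rfl | hvx
    · omega
    · have : (P ++ [x]).count v = P.count v := by
        simp [List.count_append, List.count_singleton, Ne.symm hvx]
      rw [this]
      have := pvMC_ub P v; omega
  · rw [← h]; exact pvMC_ub _ x


-- B's port returns len nums - pvMC nums on nonempty input
lemma pv_alt_eq (nums : List Int) (h : nums ≠ []) :
    maximizeGreatness_alt nums = PySem.List.len nums - pvMC nums := by
  have hvals : (PySem.Dict.counter nums).values
      = (PySem.Set.ofList nums).map (fun k => ((List.count k nums : Nat) : Int)) := by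
    simp only [PySem.Dict.values, PySem.Dict.items_counter, List.map_map]
    rfl
  obtain ⟨a, t, rfl⟩ := List.exists_cons_of_ne_nil h
  have hmem : a ∈ PySem.Set.ofList (a :: t) :=
    (PySem.Set.mem_ofList _ _).mpr List.mem_cons_self
  have hvne : (PySem.Dict.counter (a :: t)).values ≠ [] := by
    rw [hvals]
    intro h0
    rw [List.map_eq_nil_iff] at h0
    rw [h0] at hmem
    exact absurd hmem (List.not_mem_nil)
  rcases hm : PySem.List.max? (PySem.Dict.counter (a :: t)).values (fun v => v) with _ | m
  · exact absurd ((PySem.List.max?_eq_none_iff _ _).mp hm) hvne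
  · have hmmem := PySem.List.max?_mem hm
    rw [hvals] at hmmem
    obtain ⟨w, hw, hweq⟩ := List.mem_map.mp hmmem
    have hwmem : w ∈ (a :: t) := (PySem.Set.mem_ofList _ _).mp hw
    have hub : m ≤ pvMC (a :: t) := by
      rw [← hweq]; exact pvMC_ub _ w
    have hlb : pvMC (a :: t) ≤ m := by
      obtain ⟨v, hv, he⟩ := pvMC_mem (a :: t) (by simp)
      have hvin : ((List.count v (a :: t) : Nat) : Int)
          ∈ (PySem.Dict.counter (a :: t)).values := by
        rw [hvals]
        exact List.mem_map.mpr ⟨v, (PySem.Set.mem_ofList _ _).mpr hv, rfl⟩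
      have := PySem.List.max?_isMax hm _ hvin
      rw [he]; exact this
    have hmeq : m = pvMC (a :: t) := le_antisymm hub hlb
    simp only [maximizeGreatness_alt, PySem.List.maxD, hm, Option.getD_some, hmeq]

-- loop invariant of A's sweep over the sorted list: after processing indices 1..n-1,
-- count = n - pvMC(prefix), small = pvMC(prefix) - multiplicity of the last prefix element,
-- and the dict holds the multiplicities of the prefix
lemma pv_aLoop_inv (s : List Int) (hne : s ≠ []) (hsort : s.Pairwise (· ≤ ·)) :
    ∀ n : Nat, 1 ≤ n → n ≤ s.length →
    ∃ d', (PySem.List.pyRange 1 (n : Int) 1).foldl (aStep s)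
            (0, 0, (PySem.Dict.empty : PySem.Dict Int Int).insert (PySem.List.pyGetD s 0 0) 1) =
          ((n : Int) - pvMC (s.take n),
           pvMC (s.take n) - ((s.take n).count (s.getD (n - 1) 0) : Int), d')
      ∧ ∀ v, d'.getD v 0 = ((s.take n).count v : Int) := by
  intro n
  induction n with
  | zero => omega
  | succ n ih =>
    intro _ h2
    rcases Nat.eq_zero_or_pos n with rfl | h1'
    · -- base case: n + 1 = 1, the loop has not run yet
      obtain ⟨a, t, rfl⟩ := List.exists_cons_of_ne_nil hne
      refine ⟨(PySem.Dict.empty : PySem.Dict Int Int).insert (PySem.List.pyGetD (a :: t) 0 0) 1,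
        ?_, ?_⟩
      · rw [PySem.List.pyRange_one_eq_nil (by norm_num)]
        have hMC : pvMC [a] = 1 := by simp [pvMC]
        simp [hMC]
      · intro v
        have h00 : PySem.List.pyGetD (a :: t) 0 0 = a := by simp [pysem]
        rw [h00, PySem.Dict.getD_insert]
        split_ifs with hv
        · simp [hv]
        · simp [List.count_singleton, Ne.symm hv]
    · -- inductive step: process index i = n
      have hn : n < s.length := by omega
      obtain ⟨d', hfold, hd⟩ := ih h1' (by omega)
      have hcast : ((n + 1 : Nat) : Int) = (n : Int) + 1 := by push_cast; ring
      rw [hcast, PySem.List.pyRange_one_succ_right (by exact_mod_cast h1'), List.foldl_append,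
        hfold]
      have hcur : PySem.List.pyGetD s (n : Int) 0 = s[n] := by
        rw [PySem.List.pyGetD_natCast]; exact List.getD_eq_getElem s 0 hn
      have hprev : PySem.List.pyGetD s ((n : Int) - 1) 0 = s[n - 1] := by
        have hc : ((n : Int) - 1) = ((n - 1 : Nat) : Int) := by omega
        rw [hc, PySem.List.pyGetD_natCast]; exact List.getD_eq_getElem s 0 (by omega)
      have hle : s[n - 1] ≤ s[n] :=
        List.pairwise_iff_getElem.mp hsort (n - 1) n (by omega) hn (by omega)
      have hgetprev : s.getD (n - 1) 0 = s[n - 1] := List.getD_eq_getElem s 0 (by omega)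
      have hgetcur : s.getD (n + 1 - 1) 0 = s[n] := by
        simp only [Nat.add_sub_cancel]; exact List.getD_eq_getElem s 0 hn
      have htake : s.take (n + 1) = s.take n ++ [s[n]] := by
        rw [List.take_succ, List.getElem?_eq_getElem hn]; rfl
      have hPne : s.take n ≠ [] := by
        have hlt : (s.take n).length = n := by rw [List.length_take]; omega
        intro h0
        rw [h0] at hlt
        simp at hlt
        omega
      have hmaxP : ∀ x ∈ s.take n, x ≤ s[n - 1] := by
        intro x hx
        obtain ⟨j, hj, hjx⟩ := List.mem_take_iff_getElem.mp hx
        subst hjx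
        have hjn : j ≤ n - 1 := by omega
        rcases lt_or_eq_of_le hjn with hlt | he
        · exact List.pairwise_iff_getElem.mp hsort j (n - 1) (by omega) (by omega) hlt
        · exact le_of_eq (by simp [he])
      have hcP := hd (s[n - 1])
      have hubP : ((s.take n).count s[n - 1] : Int) ≤ pvMC (s.take n) := pvMC_ub _ _
      have hposP : 1 ≤ pvMC (s.take n) := pvMC_pos _ hPne
      -- unfold the step body
      simp only [List.foldl_cons, List.foldl_nil, aStep, hcur, hprev]
      by_cases hgt : s[n] > s[n - 1]
      · -- new, strictly larger value: small += d[prev]; the branch small > 0 is taken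
        have hnotin : s[n] ∉ s.take n := fun hx => absurd (hmaxP _ hx) (not_le.mpr hgt)
        have hcnt0 : (s.take n).count s[n] = 0 := List.count_eq_zero_of_not_mem hnotin
        have hcnt1 : (s.take (n + 1)).count s[n] = 1 := by
          rw [htake, List.count_append, hcnt0]; simp
        have hMC' : pvMC (s.take (n + 1)) = pvMC (s.take n) := by
          rw [htake]
          apply pvMC_append_le _ _ hPne
          rw [← htake, hcnt1]; exact_mod_cast hposP
        rw [if_pos hgt, hgetprev, hcP]
        rw [if_pos (by omega)]
        refine ⟨d'.modify s[n] 0 (· + 1), ?_, ?_⟩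
        · simp only [Prod.mk.injEq]
          refine ⟨?_, ?_, trivial⟩
          · rw [hMC']; push_cast; ring
          · rw [hgetcur, hMC', hcnt1]; push_cast; ring
        · intro v
          rw [PySem.Dict.getD_modify, htake, List.count_append]
          split_ifs with hv
          · subst hv; rw [hd, hcnt0]; simp
          · rw [hd]; simp [Ne.symm hv]
      · -- equal value (sortedness excludes <): small unchanged, multiplicity grows by 1
        have heq : s[n] = s[n - 1] := le_antisymm (not_lt.mp hgt) hle
        have hcnt : ((s.take (n + 1)).count s[n] : Int)
            = ((s.take n).count s[n - 1] : Int) + 1 := by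
          rw [htake, heq]
          simp [List.count_append]
        rw [if_neg hgt, hgetprev]
        by_cases hpos : (0 : Int) < pvMC (s.take n) - ((s.take n).count s[n - 1] : Int)
        · -- small > 0: count++, small--, max multiplicity unchanged
          have hMC' : pvMC (s.take (n + 1)) = pvMC (s.take n) := by
            rw [htake]
            apply pvMC_append_le _ _ hPne
            rw [← htake, hcnt]; omega
          rw [if_pos hpos]
          refine ⟨d'.modify s[n] 0 (· + 1), ?_, ?_⟩
          · simp only [Prod.mk.injEq]
            refine ⟨?_, ?_, trivial⟩
            · rw [hMC']; push_cast; ring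
            · rw [hgetcur, hMC', hcnt]; push_cast; ring
          · intro v
            rw [PySem.Dict.getD_modify, htake, List.count_append]
            split_ifs with hv
            · subst hv; rw [hd, heq]; simp [heq]
            · rw [hd]; simp [Ne.symm hv]
        · -- small = 0: the current value becomes the (strictly) most frequent one
          have hMC' : pvMC (s.take (n + 1)) = pvMC (s.take n) + 1 := by
            rw [htake]
            apply pvMC_append_succ
            rw [← htake, hcnt]; omega
          rw [if_neg hpos]
          refine ⟨d'.modify s[n] 0 (· + 1), ?_, ?_⟩
          · simp only [Prod.mk.injEq]
            refine ⟨?_, ?_, trivial⟩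
            · rw [hMC']; push_cast; ring
            · rw [hgetcur, hMC', hcnt]; push_cast; ring
          · intro v
            rw [PySem.Dict.getD_modify, htake, List.count_append]
            split_ifs with hv
            · subst hv; rw [hd, heq]; simp [heq]
            · rw [hd]; simp [Ne.symm hv]

lemma pv_a_eq (nums : List Int) (h : nums ≠ []) :
    maximizeGreatness nums = PySem.List.len nums - pvMC nums := by
  set s := PySem.List.sorted nums (fun x => x) false with hs
  have hsne : s ≠ [] := by
    rw [hs]; intro h0; exact h ((PySem.List.sorted_eq_nil_iff _ _ _).mp h0)
  have hperm : s.Perm nums := PySem.List.sorted_perm nums (fun x => x) false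
  have hlen : 1 ≤ s.length := List.length_pos_iff.mpr hsne
  obtain ⟨d', hfold, _⟩ := pv_aLoop_inv s hsne
    (PySem.List.sorted_pairwise nums (fun x => x)) s.length hlen le_rfl
  have : maximizeGreatness nums
      = ((PySem.List.pyRange 1 (s.length : Int) 1).foldl (aStep s)
          (0, 0, (PySem.Dict.empty : PySem.Dict Int Int).insert (PySem.List.pyGetD s 0 0) 1)).1 := by
    simp only [maximizeGreatness, ← hs, PySem.List.len_eq]
  rw [this, hfold]
  simp only [List.take_length]
  rw [PySem.List.len_eq, hperm.length_eq, pvMC_perm hperm]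

-- ===== VERDICT (by name: the statement is the Claim_ definition above) =====
theorem maximizeGreatness_spec : Claim_equal_maximizeGreatness := by
  intro nums _ hpre
  unfold Spec_maximizeGreatness
  rw [pv_a_eq nums hpre, pv_alt_eq nums hpre]
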